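-- pv_equiv track=rewrite | github.com/pypi-data/pypi-mirror-73 | packages/EcoNameTranslator/EcoNameTranslator-2.1-py3-none-any.whl/EcoNameTranslator/services/services.py | writeApiResultsToIndex
-- ===== SOURCE A (Python) =====
-- def writeApiResultsToIndex(index,taxonomyAPIResults):
--     taxaAPIDict = {}
--     newIndex = {}
--     for cleanedName,result in taxonomyAPIResults:
--         taxaAPIDict[cleanedName] = result
--
--     for name in index:
--         newIndex[name] = index[name]
--         if index[name][0] in taxaAPIDict:
--             newIndex[name][1] = taxaAPIDict[index[name][0]]
--
--     return newIndex
-- ===== SOURCE B (Python) =====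
-- def writeApiResultsToIndex(index, taxonomyAPIResults):
--     newIndex = dict(index)
--     buckets = {}
--     for name in index:
--         buckets.setdefault(index[name][0], []).append(name)
--     for cleanedName, result in taxonomyAPIResults:
--         for name in buckets.get(cleanedName, ()):
--             newIndex[name][1] = result
--     return newIndex
-- ===== Notes on version B (the rewrite author's own statement) =====
-- stated objective: alternative
-- what changed: B inverts the join: instead of scanning index and testing each cleaned name against a dict of API results, it copies index, groups index keys into buckets by cleaned name once, then iterates the API results in order assigning each result to its bucket of keys (last result wins, as with A's dict).
import Mathlib
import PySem

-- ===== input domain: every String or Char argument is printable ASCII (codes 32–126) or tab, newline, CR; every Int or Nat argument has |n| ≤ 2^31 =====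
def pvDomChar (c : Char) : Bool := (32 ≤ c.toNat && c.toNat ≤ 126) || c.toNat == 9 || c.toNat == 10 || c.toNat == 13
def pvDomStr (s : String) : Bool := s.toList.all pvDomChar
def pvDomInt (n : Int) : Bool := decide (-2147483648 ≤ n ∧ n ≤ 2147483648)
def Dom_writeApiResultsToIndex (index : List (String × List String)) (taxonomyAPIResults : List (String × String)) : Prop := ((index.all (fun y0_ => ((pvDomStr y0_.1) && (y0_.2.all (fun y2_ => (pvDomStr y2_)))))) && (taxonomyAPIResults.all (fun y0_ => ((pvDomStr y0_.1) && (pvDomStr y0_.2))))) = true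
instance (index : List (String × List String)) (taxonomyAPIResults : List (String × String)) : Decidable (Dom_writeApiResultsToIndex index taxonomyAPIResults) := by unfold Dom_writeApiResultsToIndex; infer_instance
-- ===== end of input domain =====

-- B inverts the join: it copies the index, groups index keys by their cleaned name once, and
-- then scans the API results assigning each result to its bucket of keys (objective: alternative).
-- Equivalence is about the RETURN value only: the Python A (and B) mutate index's inner lists in place.

-- ===== PORT A =====
def writeApiResultsToIndex (index : List (String × List String)) (taxonomyAPIResults : List (String × String)) : List (String × List String) :=
  let taxaAPIDict : PySem.Dict String String :=
    taxonomyAPIResults.foldl (fun d p => d.insert p.1 p.2) PySem.Dict.empty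
  let newIndex : PySem.Dict String (List String) :=
    index.foldl (fun nd p =>
      let nd1 := nd.insert p.1 p.2
      -- index[name][0]: pyGetD under Pre_ (A raises IndexError on an empty value list)
      let k := PySem.List.pyGetD p.2 0 ""
      if taxaAPIDict.contains k then
        -- newIndex[name][1] = taxaAPIDict[...]: stores the updated list at name
        nd1.insert p.1 (PySem.List.pySetD p.2 1 (taxaAPIDict.getD k ""))
      else nd1) PySem.Dict.empty
  newIndex.items

-- ===== PORT B =====
def writeApiResultsToIndex_alt (index : List (String × List String)) (taxonomyAPIResults : List (String × String)) : List (String × List String) :=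
  let newIndex0 : PySem.Dict String (List String) := PySem.Dict.ofList index
  -- buckets.setdefault(index[name][0], []).append(name)
  let buckets : PySem.Dict String (List String) :=
    index.foldl (fun d p => d.modify (PySem.List.pyGetD p.2 0 "") [] (· ++ [p.1])) PySem.Dict.empty
  let newIndex :=
    taxonomyAPIResults.foldl (fun nd q =>
      (buckets.getD q.1 []).foldl (fun nd name =>
        -- newIndex[name][1] = result
        nd.modify name [] (fun v => PySem.List.pySetD v 1 q.2)) nd) newIndex0
  newIndex.items

-- ===== PRECONDITION & SPEC =====
-- Pre_ excludes exactly (a) duplicate keys in index — index is a Python dict, so its keys are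
-- necessarily distinct — and (b) the inputs on which A raises IndexError: an empty value list
-- (index[name][0]), or a value list of length < 2 whose cleaned name occurs in the API results
-- (the assignment newIndex[name][1] = …).  B raises on exactly the same inputs.
def Pre_writeApiResultsToIndex (index : List (String × List String)) (taxonomyAPIResults : List (String × String)) : Prop :=
  (index.map Prod.fst).Nodup ∧
  ∀ p ∈ index, p.2 ≠ [] ∧ (p.2.headD "" ∈ taxonomyAPIResults.map Prod.fst → 2 ≤ p.2.length)
instance (index : List (String × List String)) (taxonomyAPIResults : List (String × String)) : Decidable (Pre_writeApiResultsToIndex index taxonomyAPIResults) := by unfold Pre_writeApiResultsToIndex; infer_instance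
def pvWitness_writeApiResultsToIndex : (List (String × List String)) × (List (String × String)) :=
  ([("canis lupus", ["canis lupus", ""]), ("felis", ["felis catus"])], [("canis lupus", "Canis lupus")])
def Spec_writeApiResultsToIndex (index : List (String × List String)) (taxonomyAPIResults : List (String × String)) (out : List (String × List String)) : Prop := out = writeApiResultsToIndex_alt index taxonomyAPIResults
instance (index : List (String × List String)) (taxonomyAPIResults : List (String × String)) (out : List (String × List String)) : Decidable (Spec_writeApiResultsToIndex index taxonomyAPIResults out) := by unfold Spec_writeApiResultsToIndex; infer_instance

-- ===== CLAIM (what is proved, stated in full; the proofs are below) =====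
def Claim_equal_writeApiResultsToIndex : Prop := ∀ (index : List (String × List String)) (taxonomyAPIResults : List (String × String)), Dom_writeApiResultsToIndex index taxonomyAPIResults → Pre_writeApiResultsToIndex index taxonomyAPIResults → Spec_writeApiResultsToIndex index taxonomyAPIResults (writeApiResultsToIndex index taxonomyAPIResults)


-- ===== LEMMAS AND PROOFS =====

-- the cleaned name of an index entry's value list, as both programs read it
def pvKey (v : List String) : String := PySem.List.pyGetD v 0 ""

-- the dict A builds from the API results (last occurrence of a cleaned name wins)
def pvDictOf (results : List (String × String)) : PySem.Dict String String :=
  results.foldl (fun d p => d.insert p.1 p.2) PySem.Dict.empty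

-- the per-entry update both programs perform on a value list
def pvUpd (results : List (String × String)) (v : List String) : List String :=
  if (pvDictOf results).contains (pvKey v) then
    PySem.List.pySetD v 1 ((pvDictOf results).getD (pvKey v) "") else v

theorem pv_snd_eq_of_nodup_fst {α β : Type} {l : List (α × β)} (h : (l.map Prod.fst).Nodup)
    {a : α} {b c : β} (h1 : (a,b) ∈ l) (h2 : (a,c) ∈ l) : b = c :=
  congrArg Prod.snd (List.inj_on_of_nodup_map h h1 h2 rfl)

-- A's loop writes each entry once: it is the single-insert loop of the updated value
theorem pv_A_char (index : List (String × List String)) (results : List (String × String))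
    (hnd : (index.map Prod.fst).Nodup) :
    writeApiResultsToIndex index results = index.map (fun p => (p.1, pvUpd results p.2)) := by
  unfold writeApiResultsToIndex
  have hstep : (fun (nd : PySem.Dict String (List String)) (p : String × List String) =>
      let nd1 := nd.insert p.1 p.2
      let k := PySem.List.pyGetD p.2 0 ""
      if (pvDictOf results).contains k then
        nd1.insert p.1 (PySem.List.pySetD p.2 1 ((pvDictOf results).getD k ""))
      else nd1)
      = fun nd p => nd.insert p.1 (pvUpd results p.2) := by
    funext nd p
    simp only [pvUpd, pvKey]
    split_ifs with h
    · exact PySem.Dict.insert_insert_self nd p.1 p.2 _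
    · rfl
  show (index.foldl _ PySem.Dict.empty).items = _
  rw [show (pvDictOf results) = results.foldl (fun d p => d.insert p.1 p.2) PySem.Dict.empty from rfl] at hstep
  rw [hstep]
  rw [PySem.Dict.items_foldl_insert_fresh index Prod.fst (fun p => pvUpd results p.2)
    PySem.Dict.empty (by intro a _; simp) hnd]
  simp [PySem.Dict.empty]


-- pySetD at index 1 is idempotent (used for "last assignment wins")
theorem pv_pySetD_idem (v : List String) (r r' : String) :
    PySem.List.pySetD (PySem.List.pySetD v 1 r) 1 r' = PySem.List.pySetD v 1 r' := by
  rw [PySem.List.pySetD_of_nonneg _ _ (by norm_num), PySem.List.pySetD_of_nonneg _ _ (by norm_num),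
    PySem.List.pySetD_of_nonneg _ _ (by norm_num)]
  exact List.set_set r

-- B's bucket for a cleaned name c is the list of index keys whose value has cleaned name c
theorem pv_buckets (index : List (String × List String)) (c : String) :
    (index.foldl (fun d p => d.modify (PySem.List.pyGetD p.2 0 "") [] (· ++ [p.1])) PySem.Dict.empty).getD c []
      = (index.filter (fun p => pvKey p.2 == c)).map Prod.fst := by
  have h1 : (index.foldl (fun d p => d.modify (PySem.List.pyGetD p.2 0 "") [] (· ++ [p.1])) PySem.Dict.empty)
      = ((index.map (fun p => (pvKey p.2, p.1))).foldl (fun d p => d.modify p.1 [] (· ++ [p.2])) PySem.Dict.empty) := by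
    rw [List.foldl_map]; rfl
  rw [h1, PySem.Dict.getD_foldl_modify_append]
  simp [List.filter_map, Function.comp_def]

theorem pv_mem_bucket (index : List (String × List String)) (hnd : (index.map Prod.fst).Nodup)
    {n : String} {v : List String} (hm : (n, v) ∈ index) (c : String) :
    n ∈ (index.filter (fun p => pvKey p.2 == c)).map Prod.fst ↔ pvKey v = c := by
  constructor
  · intro h
    obtain ⟨p, hp, hpn⟩ := List.mem_map.1 h
    have hpf := List.mem_filter.1 hp
    have : p.2 = v := pv_snd_eq_of_nodup_fst hnd (hpn ▸ (by simpa using hpf.1)) hm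
    simpa [this] using hpf.2
  · intro h
    exact List.mem_map.2 ⟨(n, v), List.mem_filter.2 ⟨hm, by simp [h]⟩, rfl⟩

-- folding idempotent modifies over a list of names reads back as one conditional application
theorem pv_getD_modify_names (names : List String) (f : List String → List String)
    (hf : ∀ v, f (f v) = f v) (d : PySem.Dict String (List String)) (n : String) :
    (names.foldl (fun d m => d.modify m [] f) d).getD n []
      = if n ∈ names then f (d.getD n []) else d.getD n [] := by
  induction names generalizing d with
  | nil => simp
  | cons m names ih =>
    simp only [List.foldl_cons, ih, PySem.Dict.getD_modify, List.mem_cons]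
    by_cases hm : n = m <;> by_cases hn : n ∈ names <;> simp [hm, hn, hf]

theorem pv_keys_modify_names (names : List String) (f : List String → List String)
    (d : PySem.Dict String (List String)) (h : ∀ m ∈ names, m ∈ d.keys) :
    (names.foldl (fun d m => d.modify m [] f) d).keys = d.keys := by
  induction names generalizing d with
  | nil => rfl
  | cons m names ih =>
    have hc : d.contains m = true := (PySem.Dict.contains_iff_mem_keys d m).2 (h m (by simp))
    have hk : (d.modify m [] f).keys = d.keys := by
      rw [PySem.Dict.keys_modify, PySem.Dict.keys_insert_of_contains _ _ hc]
    simp only [List.foldl_cons]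
    rw [ih _ (fun m' hm' => hk ▸ h m' (by simp [hm'])), hk]

-- the whole result-driven phase of B, read back at one key n
theorem pv_outer (buckets : PySem.Dict String (List String)) (results : List (String × String))
    (d : PySem.Dict String (List String)) (n : String) :
    ((results.foldl (fun nd q => (buckets.getD q.1 []).foldl
        (fun nd name => nd.modify name [] (fun v => PySem.List.pySetD v 1 q.2)) nd) d).getD n [])
      = results.foldl (fun v q => if n ∈ buckets.getD q.1 [] then PySem.List.pySetD v 1 q.2 else v)
          (d.getD n []) := by
  induction results generalizing d with
  | nil => rfl
  | cons q results ih =>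
    simp only [List.foldl_cons, ih]
    rw [pv_getD_modify_names _ _ (fun v => pv_pySetD_idem v _ _)]

theorem pv_keys_outer (buckets : PySem.Dict String (List String)) (results : List (String × String))
    (d : PySem.Dict String (List String))
    (h : ∀ q ∈ results, ∀ m ∈ buckets.getD q.1 [], m ∈ d.keys) :
    (results.foldl (fun nd q => (buckets.getD q.1 []).foldl
        (fun nd name => nd.modify name [] (fun v => PySem.List.pySetD v 1 q.2)) nd) d).keys = d.keys := by
  induction results generalizing d with
  | nil => rfl
  | cons q results ih =>
    have hk := pv_keys_modify_names (buckets.getD q.1 []) (fun v => PySem.List.pySetD v 1 q.2) d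
      (h q (by simp))
    simp only [List.foldl_cons]
    rw [ih _ (fun q' hq' m hm => hk ▸ h q' (by simp [hq']) m hm), hk]

-- scanning the results in order with "last assignment wins" equals A's dict lookup
theorem pv_lastwins (k : String) (results : List (String × String)) (v : List String) :
    results.foldl (fun w q => if k == q.1 then PySem.List.pySetD w 1 q.2 else w) v
      = if (pvDictOf results).contains k then
          PySem.List.pySetD v 1 ((pvDictOf results).getD k "") else v := by
  induction results using List.reverseRecOn with
  | nil => simp [pvDictOf]
  | append_singleton results q ih =>
    have hD : pvDictOf (results ++ [q]) = (pvDictOf results).insert q.1 q.2 := by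
      simp [pvDictOf]
    rw [List.foldl_append, ih, hD]
    by_cases hk : k = q.1
    · simp [hk]
      split_ifs <;> simp [pv_pySetD_idem]
    · rw [PySem.Dict.contains_insert, PySem.Dict.getD_insert]
      simp [hk, show (k == q.1) = false from by simp [hk]]

theorem pv_items_ofList (index : List (String × List String)) (hnd : (index.map Prod.fst).Nodup) :
    (PySem.Dict.ofList index).items = index := by
  simp only [PySem.Dict.ofList, PySem.Dict.update]
  have := PySem.Dict.items_foldl_insert_fresh index Prod.fst Prod.snd PySem.Dict.empty
    (by intro a _; simp) hnd
  simpa [PySem.Dict.empty] using this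

-- B computes, entry by entry, the same update as A
theorem pv_B_char (index : List (String × List String)) (results : List (String × String))
    (hnd : (index.map Prod.fst).Nodup) :
    writeApiResultsToIndex_alt index results = index.map (fun p => (p.1, pvUpd results p.2)) := by
  unfold writeApiResultsToIndex_alt
  have hitems : (PySem.Dict.ofList index).items = index := pv_items_ofList index hnd
  have hkeys0 : (PySem.Dict.ofList index).keys = index.map Prod.fst := by
    simp only [PySem.Dict.keys, hitems]
  have hsub : ∀ q ∈ results, ∀ m ∈
      (index.foldl (fun d p => d.modify (PySem.List.pyGetD p.2 0 "") [] (· ++ [p.1])) PySem.Dict.empty).getD q.1 [],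
      m ∈ (PySem.Dict.ofList index).keys := by
    intro q _ m hm
    rw [pv_buckets] at hm
    obtain ⟨p, hp, hpn⟩ := List.mem_map.1 hm
    rw [hkeys0]
    exact hpn ▸ List.mem_map_of_mem (List.mem_filter.1 hp).1
  have hkeys := pv_keys_outer _ results (PySem.Dict.ofList index) hsub
  rw [hkeys0] at hkeys
  rw [PySem.Dict.items_eq_map_keys _ (hkeys ▸ hnd) [], hkeys, List.map_map]
  apply List.map_congr_left
  intro p hp
  simp only [Function.comp_apply]
  refine Prod.ext rfl ?_
  show (_ : PySem.Dict String (List String)).getD p.1 [] = pvUpd results p.2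
  rw [pv_outer]
  have hpmem : (p.1, p.2) ∈ (PySem.Dict.ofList index).items := by
    rw [hitems]; simpa using hp
  have hv : (PySem.Dict.ofList index).getD p.1 [] = p.2 :=
    PySem.Dict.getD_of_mem_items _ hpmem (by rw [hkeys0]; exact hnd) []
  rw [hv]
  rw [PySem.List.foldl_congr_mem results _
    (fun v q => if pvKey p.2 == q.1 then PySem.List.pySetD v 1 q.2 else v) p.2 ?_]
  · have := pv_lastwins (pvKey p.2) results p.2
    simpa [pvUpd] using this
  · intro acc q _
    rw [pv_buckets]
    by_cases h : pvKey p.2 = q.1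
    · rw [if_pos ((pv_mem_bucket index hnd hp q.1).2 h)]; simp [h]
    · rw [if_neg (fun hc => h ((pv_mem_bucket index hnd hp q.1).1 hc))]; simp [h]

theorem writeApiResultsToIndex_spec : Claim_equal_writeApiResultsToIndex := by
  intro index results _ hpre
  unfold Spec_writeApiResultsToIndex
  rw [pv_A_char index results hpre.1, pv_B_char index results hpre.1]
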